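-- pv_equiv track=rewrite | github.com/AkusChhabra/CPS109 | allproblemx.py | is_zigzag
-- ===== SOURCE A (Python) =====
-- def is_zigzag(n):
--
--   check, count = False, 0
--   li = [int(i) for i in str(n)]
--
--   if len(li) == 1:
--     return True
--
--   for i in range(1, len(li)):
--     if li[0] < li[1]:
--       if i % 2 == 1 and li[i] > li[i-1]:
--         count += 1
--       if i % 2 == 0 and li[i] < li[i-1]:
--         count += 1
--     if li[0] > li[1]:
--       if i % 2 == 1 and li[i] < li[i-1]:
--         count += 1
--       if i % 2 == 0 and li[i] > li[i-1]:
--         count += 1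
--
--   if count == len(li)-1:
--     check = True
--
--   return check
-- ===== SOURCE B (Python) =====
-- def is_zigzag(n):
--     digits = [int(c) for c in str(n)]
--     signs = [(a > b) - (a < b) for a, b in zip(digits, digits[1:])]
--     return all(s != 0 for s in signs) and all(s * t < 0 for s, t in zip(signs, signs[1:]))
-- ===== Notes on version B (the rewrite author's own statement) =====
-- stated objective: simpler
-- what changed: A fixes a direction from the first digit pair and counts, per loop index, whether each comparison matches the parity-expected direction, then compares the count to len-1; B instead builds the list of consecutive slope signs once and returns whether every sign is nonzero and adjacent signs strictly alternate (each product negative), with no index-parity bookkeeping and no counter. Pre_ excludes negative inputs, where A and B alike raise ValueError at int of the minus sign.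
import Mathlib
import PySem

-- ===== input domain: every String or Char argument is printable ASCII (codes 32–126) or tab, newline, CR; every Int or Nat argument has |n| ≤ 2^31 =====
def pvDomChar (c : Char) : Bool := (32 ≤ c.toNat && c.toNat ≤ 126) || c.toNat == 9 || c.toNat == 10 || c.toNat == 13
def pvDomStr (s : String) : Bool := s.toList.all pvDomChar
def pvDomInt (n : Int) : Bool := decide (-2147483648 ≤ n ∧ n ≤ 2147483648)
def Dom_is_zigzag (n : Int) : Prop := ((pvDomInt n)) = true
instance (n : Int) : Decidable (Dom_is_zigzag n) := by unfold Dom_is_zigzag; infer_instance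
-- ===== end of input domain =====

-- B replaces A's fix-direction-from-first-pair + index-parity counting loop by a two-phase
-- decomposition: build the list of consecutive slope signs, then check it alternates (simpler).

-- ===== PORT A =====
-- int(c) on a single character is ported via PySem.Int.ofStr?; it is exact wherever Python's
-- int() succeeds. On n < 0, str(n) starts with '-' and Python raises ValueError (Pre_ excludes
-- those inputs). li[i] is ported with pyGetD 0: the loop indices are always in range.
def is_zigzag (n : Int) : Bool :=
  let check : Bool := false
  let count : Int := 0
  let li : List Int := (PySem.Int.toStr n).toList.map (fun c => (PySem.Int.ofStr? (String.ofList [c])).getD 0)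
  if li.length == 1 then true
  else
    let count := (PySem.List.pyRange 1 (li.length : Int) 1).foldl (fun (count : Int) (i : Int) =>
      let count :=
        if PySem.List.pyGetD li 0 0 < PySem.List.pyGetD li 1 0 then
          let count := if PySem.Int.mod i 2 == 1 && decide (PySem.List.pyGetD li i 0 > PySem.List.pyGetD li (i-1) 0) then count + 1 else count
          if PySem.Int.mod i 2 == 0 && decide (PySem.List.pyGetD li i 0 < PySem.List.pyGetD li (i-1) 0) then count + 1 else count
        else count
      if PySem.List.pyGetD li 0 0 > PySem.List.pyGetD li 1 0 then
        let count := if PySem.Int.mod i 2 == 1 && decide (PySem.List.pyGetD li i 0 < PySem.List.pyGetD li (i-1) 0) then count + 1 else count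
        if PySem.Int.mod i 2 == 0 && decide (PySem.List.pyGetD li i 0 > PySem.List.pyGetD li (i-1) 0) then count + 1 else count
      else count) count
    let check := if count == (li.length : Int) - 1 then true else check
    check

-- ===== PORT B =====
-- digits[1:] and signs[1:] are Python slices, ported with PySem.List.slice.
def is_zigzag_alt (n : Int) : Bool :=
  let digits : List Int := (PySem.Int.toStr n).toList.map (fun c => (PySem.Int.ofStr? (String.ofList [c])).getD 0)
  let signs : List Int := (digits.zip (PySem.List.slice digits (some 1) none)).map
    (fun p => (if p.1 > p.2 then (1 : Int) else 0) - (if p.1 < p.2 then (1 : Int) else 0))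
  (signs.all (fun s => !(s == 0))) &&
    ((signs.zip (PySem.List.slice signs (some 1) none)).all (fun p => decide (p.1 * p.2 < 0)))

-- ===== PRECONDITION & SPEC =====
-- Pre_ excludes exactly the inputs where Python A raises: on negative inputs str(n) contains a minus sign
-- and the comprehension int('-') raises ValueError (B raises identically there).
def Pre_is_zigzag (n : Int) : Prop := 0 ≤ n
instance (n : Int) : Decidable (Pre_is_zigzag n) := by unfold Pre_is_zigzag; infer_instance
def pvWitness_is_zigzag : Int := 121

def Spec_is_zigzag (n : Int) (out : Bool) : Prop := out = is_zigzag_alt n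
instance (n : Int) (out : Bool) : Decidable (Spec_is_zigzag n out) := by unfold Spec_is_zigzag; infer_instance

-- ===== CLAIM (what is proved, stated in full; the proofs are below) =====
def Claim_equal_is_zigzag : Prop := ∀ (n : Int), Dom_is_zigzag n → Pre_is_zigzag n → Spec_is_zigzag n (is_zigzag n)

-- ===== LEMMAS AND PROOFS =====

-- the digit list both ports build
def pvDigits (n : Int) : List Int :=
  (PySem.Int.toStr n).toList.map (fun c => (PySem.Int.ofStr? (String.ofList [c])).getD 0)

-- A's code from `li` on, over an arbitrary list
def pvAcore (l : List Int) : Bool :=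
  let check : Bool := false
  if l.length == 1 then true
  else
    let count := (PySem.List.pyRange 1 (l.length : Int) 1).foldl (fun (count : Int) (i : Int) =>
      let count :=
        if PySem.List.pyGetD l 0 0 < PySem.List.pyGetD l 1 0 then
          let count := if PySem.Int.mod i 2 == 1 && decide (PySem.List.pyGetD l i 0 > PySem.List.pyGetD l (i-1) 0) then count + 1 else count
          if PySem.Int.mod i 2 == 0 && decide (PySem.List.pyGetD l i 0 < PySem.List.pyGetD l (i-1) 0) then count + 1 else count
        else count
      if PySem.List.pyGetD l 0 0 > PySem.List.pyGetD l 1 0 then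
        let count := if PySem.Int.mod i 2 == 1 && decide (PySem.List.pyGetD l i 0 < PySem.List.pyGetD l (i-1) 0) then count + 1 else count
        if PySem.Int.mod i 2 == 0 && decide (PySem.List.pyGetD l i 0 > PySem.List.pyGetD l (i-1) 0) then count + 1 else count
      else count) (0 : Int)
    let check := if count == (l.length : Int) - 1 then true else check
    check

-- B's code from `digits` on, over an arbitrary list
def pvBcore (l : List Int) : Bool :=
  let signs : List Int := (l.zip (PySem.List.slice l (some 1) none)).map
    (fun p => (if p.1 > p.2 then (1 : Int) else 0) - (if p.1 < p.2 then (1 : Int) else 0))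
  (signs.all (fun s => !(s == 0))) &&
    ((signs.zip (PySem.List.slice signs (some 1) none)).all (fun p => decide (p.1 * p.2 < 0)))

lemma pvA_eq_core (n : Int) : is_zigzag n = pvAcore (pvDigits n) := rfl
lemma pvB_eq_core (n : Int) : is_zigzag_alt n = pvBcore (pvDigits n) := rfl

lemma pvDigits_ne_nil (n : Int) : pvDigits n ≠ [] := by
  unfold pvDigits
  simp only [PySem.Int.toList_toStr, ne_eq, List.map_eq_nil_iff]
  unfold PySem.Int.toChars
  split
  · simp
  · exact List.ne_nil_of_length_pos Nat.length_toDigits_pos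

-- slope sign, as B computes it
def pvSg (a b : Int) : Int := (if a > b then 1 else 0) - (if a < b then 1 else 0)

lemma pvSg_neg_iff (a b : Int) : pvSg a b = -1 ↔ a < b := by unfold pvSg; split_ifs <;> omega
lemma pvSg_pos_iff (a b : Int) : pvSg a b = 1 ↔ b < a := by unfold pvSg; split_ifs <;> omega
lemma pvSg_mem (a b : Int) : pvSg a b = -1 ∨ pvSg a b = 0 ∨ pvSg a b = 1 := by
  unfold pvSg; split_ifs <;> omega

def pvS (l : List Int) (j : Nat) : Int := pvSg (l.getD j 0) (l.getD (j+1) 0)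

-- A's per-index condition, in Nat/Prop form (index i = j+1)
def pvPj (l : List Int) (j : Nat) : Prop :=
  (l.getD 0 0 < l.getD 1 0 ∧ ((j % 2 = 0 ∧ l.getD j 0 < l.getD (j+1) 0) ∨ (j % 2 = 1 ∧ l.getD (j+1) 0 < l.getD j 0)))
  ∨ (l.getD 1 0 < l.getD 0 0 ∧ ((j % 2 = 0 ∧ l.getD (j+1) 0 < l.getD j 0) ∨ (j % 2 = 1 ∧ l.getD j 0 < l.getD (j+1) 0)))

-- A's condition as a Bool predicate over the Int loop index
def pvP (l : List Int) (i : Int) : Bool :=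
  (decide (PySem.List.pyGetD l 0 0 < PySem.List.pyGetD l 1 0) &&
    ((PySem.Int.mod i 2 == 1 && decide (PySem.List.pyGetD l i 0 > PySem.List.pyGetD l (i-1) 0)) ||
     (PySem.Int.mod i 2 == 0 && decide (PySem.List.pyGetD l i 0 < PySem.List.pyGetD l (i-1) 0)))) ||
  (decide (PySem.List.pyGetD l 0 0 > PySem.List.pyGetD l 1 0) &&
    ((PySem.Int.mod i 2 == 1 && decide (PySem.List.pyGetD l i 0 < PySem.List.pyGetD l (i-1) 0)) ||
     (PySem.Int.mod i 2 == 0 && decide (PySem.List.pyGetD l i 0 > PySem.List.pyGetD l (i-1) 0))))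

-- the alternation invariant both programs are equivalent to
def pvQ (l : List Int) : Prop :=
  pvS l 0 ≠ 0 ∧ ∀ j : Nat, j + 1 < l.length → pvS l j = pvS l 0 * (-1)^j

lemma pvBody_eq (l : List Int) :
    (fun (count : Int) (i : Int) =>
      let count :=
        if PySem.List.pyGetD l 0 0 < PySem.List.pyGetD l 1 0 then
          let count := if PySem.Int.mod i 2 == 1 && decide (PySem.List.pyGetD l i 0 > PySem.List.pyGetD l (i-1) 0) then count + 1 else count
          if PySem.Int.mod i 2 == 0 && decide (PySem.List.pyGetD l i 0 < PySem.List.pyGetD l (i-1) 0) then count + 1 else count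
        else count
      if PySem.List.pyGetD l 0 0 > PySem.List.pyGetD l 1 0 then
        let count := if PySem.Int.mod i 2 == 1 && decide (PySem.List.pyGetD l i 0 < PySem.List.pyGetD l (i-1) 0) then count + 1 else count
        if PySem.Int.mod i 2 == 0 && decide (PySem.List.pyGetD l i 0 > PySem.List.pyGetD l (i-1) 0) then count + 1 else count
      else count)
    = fun count i => if pvP l i then count + 1 else count := by
  funext c i
  have hm := PySem.Int.mod_eq_emod_of_pos (a := i) (b := 2) (by omega)
  have he : i % 2 = 0 ∨ i % 2 = 1 := by omega
  simp only [pvP, hm]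
  split_ifs <;> simp_all <;> omega

lemma pvAcore_iff (l : List Int) (h2 : 2 ≤ l.length) :
    pvAcore l = true ↔ ∀ i ∈ PySem.List.pyRange 1 (l.length : Int) 1, pvP l i = true := by
  have h1 : (l.length == 1) = false := by simp; omega
  unfold pvAcore
  rw [pvBody_eq]
  simp only [h1, Bool.false_eq_true, if_false]
  rw [PySem.List.foldl_if_add_one]
  have hlen : (PySem.List.pyRange 1 (l.length : Int) 1).length = l.length - 1 := by
    rw [PySem.List.length_pyRange_one]; omega
  have hcle := List.countP_le_length (p := pvP l) (l := PySem.List.pyRange 1 (l.length : Int) 1)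
  rw [← List.countP_eq_length (p := pvP l) (l := PySem.List.pyRange 1 (l.length : Int) 1)]
  by_cases hc : (0 + (List.countP (pvP l) (PySem.List.pyRange 1 (l.length : Int) 1) : Int) == (l.length : Int) - 1) = true
  · rw [if_pos hc]
    simp only [beq_iff_eq] at hc
    constructor
    · intro _; omega
    · intro _; rfl
  · rw [if_neg hc]
    simp only [beq_iff_eq] at hc
    simp only [Bool.false_eq_true, false_iff]
    omega

lemma pvP_iff_pvPj (l : List Int) (j : Nat) : pvP l ((j : Int) + 1) = true ↔ pvPj l j := by
  have h1 : ((j : Int) + 1 - 1) = ((j : Nat) : Int) := by omega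
  have h2 : ((j : Int) + 1) = (((j + 1 : Nat)) : Int) := by omega
  simp only [pvP, pvPj]
  rw [PySem.Int.mod_eq_emod_of_pos (by omega : (0:Int) < 2), h1, h2]
  simp only [PySem.List.pyGetD_natCast, PySem.List.pyGetD_ofNat', Bool.or_eq_true,
    Bool.and_eq_true, beq_iff_eq, decide_eq_true_eq, gt_iff_lt]
  omega

lemma pvA_forall_iff (l : List Int) :
    (∀ i ∈ PySem.List.pyRange 1 (l.length : Int) 1, pvP l i = true) ↔
      (∀ j : Nat, j + 1 < l.length → pvPj l j) := by
  constructor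
  · intro h j hj
    have hm : ((j : Int) + 1) ∈ PySem.List.pyRange 1 (l.length : Int) 1 := by
      rw [PySem.List.mem_pyRange_one]; omega
    exact (pvP_iff_pvPj l j).1 (h _ hm)
  · intro h i hi
    rw [PySem.List.mem_pyRange_one] at hi
    obtain ⟨j, rfl⟩ : ∃ j : Nat, i = (j : Int) + 1 := ⟨(i - 1).toNat, by omega⟩
    exact (pvP_iff_pvPj l j).2 (h j (by omega))

lemma pvPj_iff_Q (l : List Int) (h2 : 2 ≤ l.length) :
    (∀ j : Nat, j + 1 < l.length → pvPj l j) ↔ pvQ l := by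
  have hpow0 : ∀ k : Nat, k % 2 = 0 → ((-1 : Int))^k = 1 := fun k hk => (Nat.even_iff.mpr hk).neg_one_pow
  have hpow1 : ∀ k : Nat, k % 2 = 1 → ((-1 : Int))^k = -1 := fun k hk => (Nat.odd_iff.mpr hk).neg_one_pow
  unfold pvQ pvS pvPj
  simp only [zero_add]
  constructor
  · intro h
    have h0 := h 0 (by omega)
    refine ⟨?_, ?_⟩
    · rcases h0 with ⟨hlt, _⟩ | ⟨hgt, _⟩
      · rw [(pvSg_neg_iff _ _).2 hlt]; omega
      · rw [(pvSg_pos_iff _ _).2 hgt]; omega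
    · intro j hj
      rcases h j hj with ⟨hlt, hc⟩ | ⟨hgt, hc⟩
      · rw [(pvSg_neg_iff _ _).2 hlt]
        rcases hc with ⟨hpar, hx⟩ | ⟨hpar, hx⟩
        · rw [hpow0 j hpar, (pvSg_neg_iff _ _).2 hx]; ring
        · rw [hpow1 j hpar, (pvSg_pos_iff _ _).2 hx]; ring
      · rw [(pvSg_pos_iff _ _).2 hgt]
        rcases hc with ⟨hpar, hx⟩ | ⟨hpar, hx⟩
        · rw [hpow0 j hpar, (pvSg_pos_iff _ _).2 hx]; ring
        · rw [hpow1 j hpar, (pvSg_neg_iff _ _).2 hx]; ring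
  · rintro ⟨h0, hall⟩ j hj
    have hsj := hall j hj
    have hpar : j % 2 = 0 ∨ j % 2 = 1 := by omega
    rcases pvSg_mem (l.getD 0 0) (l.getD 1 0) with hS0 | hS0 | hS0
    · have hlt := (pvSg_neg_iff _ _).1 hS0
      left
      refine ⟨hlt, ?_⟩
      rcases hpar with hpar | hpar
      · left; refine ⟨hpar, ?_⟩
        rw [hS0, hpow0 j hpar] at hsj
        have hv : pvSg (l.getD j 0) (l.getD (j+1) 0) = -1 := by rw [hsj]; ring
        exact (pvSg_neg_iff _ _).1 hv
      · right; refine ⟨hpar, ?_⟩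
        rw [hS0, hpow1 j hpar] at hsj
        have hv : pvSg (l.getD j 0) (l.getD (j+1) 0) = 1 := by rw [hsj]; ring
        exact (pvSg_pos_iff _ _).1 hv
    · exact absurd hS0 h0
    · have hgt := (pvSg_pos_iff _ _).1 hS0
      right
      refine ⟨hgt, ?_⟩
      rcases hpar with hpar | hpar
      · left; refine ⟨hpar, ?_⟩
        rw [hS0, hpow0 j hpar] at hsj
        have hv : pvSg (l.getD j 0) (l.getD (j+1) 0) = 1 := by rw [hsj]; ring
        exact (pvSg_pos_iff _ _).1 hv
      · right; refine ⟨hpar, ?_⟩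
        rw [hS0, hpow1 j hpar] at hsj
        have hv : pvSg (l.getD j 0) (l.getD (j+1) 0) = -1 := by rw [hsj]; ring
        exact (pvSg_neg_iff _ _).1 hv

lemma pvBcore_iff (l : List Int) :
    pvBcore l = true ↔
      ((∀ j : Nat, j + 1 < l.length → pvS l j ≠ 0) ∧
       (∀ j : Nat, j + 2 < l.length → pvS l j * pvS l (j+1) < 0)) := by
  unfold pvBcore
  simp only [PySem.List.slice_from_one, Bool.and_eq_true, List.all_eq_true]
  set f : Int × Int → Int := fun p => (if p.1 > p.2 then (1:Int) else 0) - (if p.1 < p.2 then (1:Int) else 0) with hf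
  set sg := (l.zip l.tail).map f with hsg
  have hlen : sg.length = l.length - 1 := by
    simp [hsg, List.length_zip]
  have hget : ∀ (j : Nat) (h : j < sg.length), sg[j] = pvS l j := by
    intro j hj
    have hj1 : j < l.length := by omega
    have hj2 : j + 1 < l.length := by omega
    simp [hsg, hf, List.getElem_zip, List.getElem_tail, pvS, pvSg, hj1, hj2]
  constructor
  · rintro ⟨h1, h2⟩
    constructor
    · intro j hj
      have hjs : j < sg.length := by omega
      have hx := h1 _ (sg.getElem_mem hjs)
      rw [hget j hjs] at hx
      simpa using hx
    · intro j hj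
      have hjs : j < (sg.zip sg.tail).length := by simp [List.length_zip]; omega
      have hx := h2 _ ((sg.zip sg.tail).getElem_mem hjs)
      rw [List.getElem_zip, List.getElem_tail] at hx
      rw [hget, hget] at hx
      simpa using hx
  · rintro ⟨h1, h2⟩
    constructor
    · intro x hx
      obtain ⟨j, hj, rfl⟩ := List.mem_iff_getElem.1 hx
      rw [hget j hj]
      simpa using h1 j (by omega)
    · intro x hx
      obtain ⟨j, hj, rfl⟩ := List.mem_iff_getElem.1 hx
      rw [List.getElem_zip, List.getElem_tail, hget, hget]
      · simp only [decide_eq_true_eq]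
        have hjl : j + 2 < l.length := by simp [List.length_zip] at hj; omega
        exact h2 j hjl

lemma pvB_iff_Q (l : List Int) (h2 : 2 ≤ l.length) :
    ((∀ j : Nat, j + 1 < l.length → pvS l j ≠ 0) ∧
     (∀ j : Nat, j + 2 < l.length → pvS l j * pvS l (j+1) < 0)) ↔ pvQ l := by
  have hmem0 : pvS l 0 = -1 ∨ pvS l 0 = 0 ∨ pvS l 0 = 1 := by unfold pvS; exact pvSg_mem _ _
  constructor
  · rintro ⟨hnz, hprod⟩
    have h0 : pvS l 0 ≠ 0 := hnz 0 (by omega)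
    refine ⟨h0, ?_⟩
    intro j hj
    induction j with
    | zero => simp
    | succ k ih =>
      have hk := ih (by omega)
      have hp := hprod k (by omega)
      have hnk1 : pvS l (k+1) ≠ 0 := hnz (k+1) (by omega)
      have hmem : pvS l (k+1) = -1 ∨ pvS l (k+1) = 0 ∨ pvS l (k+1) = 1 := by
        unfold pvS; exact pvSg_mem _ _
      rcases Nat.even_or_odd k with hev | hod
      · have hpk : ((-1 : Int))^k = 1 := hev.neg_one_pow
        have hpk1 : ((-1 : Int))^(k+1) = -1 := by rw [pow_succ, hpk]; ring
        rw [hpk] at hk; rw [hpk1]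
        rcases hmem0 with hS0 | hS0 | hS0
        · rw [hS0] at hk ⊢
          rw [hk] at hp
          rcases hmem with hb | hb | hb <;> rw [hb] at hp ⊢ <;> omega
        · exact absurd hS0 h0
        · rw [hS0] at hk ⊢
          rw [hk] at hp
          rcases hmem with hb | hb | hb <;> rw [hb] at hp ⊢ <;> omega
      · have hpk : ((-1 : Int))^k = -1 := hod.neg_one_pow
        have hpk1 : ((-1 : Int))^(k+1) = 1 := by rw [pow_succ, hpk]; ring
        rw [hpk] at hk; rw [hpk1]
        rcases hmem0 with hS0 | hS0 | hS0
        · rw [hS0] at hk ⊢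
          rw [hk] at hp
          rcases hmem with hb | hb | hb <;> rw [hb] at hp ⊢ <;> omega
        · exact absurd hS0 h0
        · rw [hS0] at hk ⊢
          rw [hk] at hp
          rcases hmem with hb | hb | hb <;> rw [hb] at hp ⊢ <;> omega
  · rintro ⟨h0, hall⟩
    constructor
    · intro j hj
      rw [hall j hj]
      exact mul_ne_zero h0 (pow_ne_zero _ (by norm_num))
    · intro j hj
      rw [hall j (by omega), hall (j+1) (by omega), pow_succ]
      rcases Nat.even_or_odd j with hev | hod
      · rw [hev.neg_one_pow]
        rcases hmem0 with hS0 | hS0 | hS0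
        · rw [hS0]; norm_num
        · exact absurd hS0 h0
        · rw [hS0]; norm_num
      · rw [hod.neg_one_pow]
        rcases hmem0 with hS0 | hS0 | hS0
        · rw [hS0]; norm_num
        · exact absurd hS0 h0
        · rw [hS0]; norm_num

lemma pvMain (l : List Int) (hne : l ≠ []) : pvAcore l = pvBcore l := by
  match l with
  | [] => exact absurd rfl hne
  | [d] => simp [pvAcore, pvBcore, PySem.List.slice_from_one]
  | d0 :: d1 :: t =>
    have h2 : 2 ≤ (d0 :: d1 :: t).length := by simp
    apply Bool.eq_iff_iff.2
    rw [pvAcore_iff _ h2, pvBcore_iff, pvA_forall_iff, pvPj_iff_Q _ h2, pvB_iff_Q _ h2]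

-- ===== VERDICT (by name: the statement is the Claim_ definition above) =====
theorem is_zigzag_spec : Claim_equal_is_zigzag := by
  intro n _ _
  unfold Spec_is_zigzag
  rw [pvA_eq_core, pvB_eq_core, pvMain _ (pvDigits_ne_nil n)]
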